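-- pv_equiv track=rewrite | github.com/percywk/past-projects | traveling_rewrite.py | analyze_hierarchy_dicts
-- ===== SOURCE A (Python) =====
-- def analyze_hierarchy_dicts(node_list, heirarchy_list):
-- 	isolated_nodes = []
--
-- 	for dictionary in heirarchy_list:
-- 		heirarchy_count, min_level, max_level = count_heirarchy_levels(dictionary)
--
-- 		isolated_levels = []
-- 		for level, count in heirarchy_count.items():
-- 			if count == 1 and level != max_level and level != min_level:
-- 				isolated_levels.append(level)
--
-- 		if len(isolated_levels) > 0:
-- 			for node_id, level in dictionary.items():
-- 				if level in isolated_levels: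
-- 					isolated_nodes.append(node_id)
--
-- 	return isolated_nodes
--
-- def count_heirarchy_levels(heirarchy_dict):
-- 	heirarchy_count = {}
-- 	max_level = 0
-- 	min_level = 0
-- 	for key, level in heirarchy_dict.items():
--
-- 		if level > max_level:
-- 			max_level = level
--
-- 		if level in heirarchy_count.keys():
-- 			heirarchy_count[level] += 1
-- 		else:
-- 			heirarchy_count[level] = 1
--
-- 	return heirarchy_count, min_level, max_level
-- ===== SOURCE B (Python) =====
-- def analyze_hierarchy_dicts(node_list, heirarchy_list):
-- 	isolated_nodes = []
-- 	for dictionary in heirarchy_list: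
-- 		groups = {}
-- 		max_level = 0
-- 		for node_id, level in dictionary.items():
-- 			groups.setdefault(level, []).append(node_id)
-- 			if level > max_level:
-- 				max_level = level
-- 		for level, ids in groups.items():
-- 			if len(ids) == 1 and level != 0 and level != max_level:
-- 				isolated_nodes.append(ids[0])
-- 	return isolated_nodes
-- ===== Notes on version B (the rewrite author's own statement) =====
-- stated objective: simpler
-- what changed: B replaces the count-table helper plus a second rescan of the dict with a single inlined pass that groups node ids by level (level -> list of ids) while tracking the running max, then emits the lone id of each singleton group whose level is neither 0 nor the max; no separate helper and no re-scan of the dictionary.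
import Mathlib
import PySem

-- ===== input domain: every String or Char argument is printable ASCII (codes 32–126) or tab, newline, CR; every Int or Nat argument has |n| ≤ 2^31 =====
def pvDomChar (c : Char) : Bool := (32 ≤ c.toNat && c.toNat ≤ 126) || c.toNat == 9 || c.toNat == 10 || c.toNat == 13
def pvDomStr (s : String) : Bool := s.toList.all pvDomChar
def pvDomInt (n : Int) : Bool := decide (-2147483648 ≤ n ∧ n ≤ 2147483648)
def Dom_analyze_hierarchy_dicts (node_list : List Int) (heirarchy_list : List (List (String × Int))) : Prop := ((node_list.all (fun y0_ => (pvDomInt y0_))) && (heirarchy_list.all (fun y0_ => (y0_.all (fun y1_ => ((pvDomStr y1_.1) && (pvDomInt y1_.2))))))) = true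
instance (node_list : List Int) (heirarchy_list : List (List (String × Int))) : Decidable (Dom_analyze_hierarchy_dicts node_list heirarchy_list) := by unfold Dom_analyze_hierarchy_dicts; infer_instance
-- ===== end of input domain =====

-- B inlines the count-table helper into one grouping pass (level -> node ids, plus running max)
-- and then emits the lone id of each singleton group whose level is neither 0 nor the max:
-- one pass over the dict and one over the groups, no second rescan of the dict; objective: simpler.

-- ===== PORT A =====
-- helper: count_heirarchy_levels (returns (heirarchy_count, min_level, max_level))
def pvCountLevels (heirarchy_dict : List (String × Int)) : PySem.Dict Int Int × Int × Int :=
  let st := (PySem.Dict.ofList heirarchy_dict).items.foldl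
      (fun (st : PySem.Dict Int Int × Int) p =>
        (if st.1.contains p.2 then st.1.insert p.2 (st.1.getD p.2 0 + 1) else st.1.insert p.2 1,
         if p.2 > st.2 then p.2 else st.2))
      (PySem.Dict.empty, 0)
  (st.1, 0, st.2)

def analyze_hierarchy_dicts (node_list : List Int) (heirarchy_list : List (List (String × Int))) : List String :=
  heirarchy_list.foldl (fun isolated_nodes dictionary =>
    let r := pvCountLevels dictionary
    let heirarchy_count := r.1
    let min_level := r.2.1
    let max_level := r.2.2
    let isolated_levels := heirarchy_count.items.foldl
      (fun ls p => if p.2 == 1 && !(p.1 == max_level) && !(p.1 == min_level) then ls ++ [p.1] else ls) []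
    if isolated_levels.length > 0 then
      (PySem.Dict.ofList dictionary).items.foldl
        (fun ns p => if isolated_levels.contains p.2 then ns ++ [p.1] else ns) isolated_nodes
    else isolated_nodes) []

-- ===== PORT B =====
def analyze_hierarchy_dicts_alt (node_list : List Int) (heirarchy_list : List (List (String × Int))) : List String :=
  heirarchy_list.foldl (fun isolated_nodes dictionary =>
    let st := (PySem.Dict.ofList dictionary).items.foldl
      (fun (st : PySem.Dict Int (List String) × Int) p =>
        (st.1.modify p.2 [] (fun ids => ids ++ [p.1]), if p.2 > st.2 then p.2 else st.2))
      (PySem.Dict.empty, 0)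
    st.1.items.foldl
      (fun ns g => if g.2.length == 1 && !(g.1 == (0:Int)) && !(g.1 == st.2) then ns ++ [g.2[0]!] else ns)
      isolated_nodes) []

-- ===== PRECONDITION & SPEC =====
def Spec_analyze_hierarchy_dicts (node_list : List Int) (heirarchy_list : List (List (String × Int))) (out : List String) : Prop := out = analyze_hierarchy_dicts_alt node_list heirarchy_list
instance (node_list : List Int) (heirarchy_list : List (List (String × Int))) (out : List String) : Decidable (Spec_analyze_hierarchy_dicts node_list heirarchy_list out) := by unfold Spec_analyze_hierarchy_dicts; infer_instance

-- ===== CLAIM (what is proved, stated in full; the proofs are below) =====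
def Claim_equal_analyze_hierarchy_dicts : Prop := ∀ (node_list : List Int) (heirarchy_list : List (List (String × Int))), Dom_analyze_hierarchy_dicts node_list heirarchy_list → Spec_analyze_hierarchy_dicts node_list heirarchy_list (analyze_hierarchy_dicts node_list heirarchy_list)

-- ===== LEMMAS AND PROOFS =====

theorem pvGroupSplit (ps : List (String × Int)) (q : Int → Bool)
    (h : ∀ k, q k = true → (ps.map Prod.snd).count k ≤ 1) :
    (ps.filter (fun p => q p.2)).map Prod.fst
      = ((PySem.Set.ofList (ps.map Prod.snd)).filter q).flatMap
          (fun k => (ps.filter (fun p => p.2 == k)).map Prod.fst) := by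
  induction ps with
  | nil => simp
  | cons p ps ih =>
    obtain ⟨a, b⟩ := p
    simp only [List.map_cons]
    rw [PySem.Set.ofList_cons]
    by_cases hb : q b = true
    · have hcnt := h b hb
      simp only [List.map_cons, List.count_cons_self] at hcnt
      have hnotmem : b ∉ ps.map Prod.snd := by
        have : (ps.map Prod.snd).count b = 0 := by omega
        simpa [List.count_eq_zero] using this
      have hdis : PySem.Set.discard (PySem.Set.ofList (ps.map Prod.snd)) b
          = PySem.Set.ofList (ps.map Prod.snd) := by
        refine List.filter_eq_self.mpr ?_
        intro y hy
        have hy' : y ∈ ps.map Prod.snd := (PySem.Set.mem_ofList _ _).1 hy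
        rcases eq_or_ne y b with rfl | hne
        · exact absurd hy' hnotmem
        · simp [hne]
      rw [hdis]
      rw [List.filter_cons_of_pos hb, List.filter_cons_of_pos (by simpa using hb)]
      rw [List.flatMap_cons]
      rw [List.filter_cons_of_pos (by simp)]
      have hgrpb : ps.filter (fun p => p.2 == b) = [] := by
        refine List.filter_eq_nil_iff.mpr ?_
        intro p hp hpe
        apply hnotmem
        have hpb : p.2 = b := by simpa using hpe
        exact hpb ▸ List.mem_map_of_mem hp
      rw [hgrpb]
      have htail : ((PySem.Set.ofList (ps.map Prod.snd)).filter q).flatMap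
            (fun k => (((a, b) :: ps).filter (fun p => p.2 == k)).map Prod.fst)
          = ((PySem.Set.ofList (ps.map Prod.snd)).filter q).flatMap
            (fun k => (ps.filter (fun p => p.2 == k)).map Prod.fst) := by
        apply List.flatMap_congr
        intro k hk
        have hkmem : k ∈ ps.map Prod.snd :=
          (PySem.Set.mem_ofList _ _).1 (List.mem_of_mem_filter hk)
        have hkb : ¬ ((b : Int) == k) = true := by
          simp only [beq_iff_eq]; rintro rfl; exact hnotmem hkmem
        rw [List.filter_cons_of_neg (by simpa using hkb)]
      rw [htail, List.map_cons]
      rw [ih (fun k hk => by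
        have hk2 := h k hk; simp only [List.map_cons] at hk2
        exact le_trans (List.count_le_count_cons ..) hk2)]
      simp
    · have hbf : q b = false := by simpa using hb
      rw [List.filter_cons_of_neg (by simp [hbf])]
      rw [List.filter_cons_of_neg (by simp [hbf])]
      have hset : (PySem.Set.discard (PySem.Set.ofList (ps.map Prod.snd)) b).filter q
          = (PySem.Set.ofList (ps.map Prod.snd)).filter q := by
        show ((PySem.Set.ofList (ps.map Prod.snd)).filter _).filter q = _
        rw [List.filter_filter]
        apply List.filter_congr
        intro y _
        cases hqy : q y with
        | false => simp
        | true => simp; rintro rfl; rw [hqy] at hbf; exact absurd hbf (by simp)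
      rw [hset]
      have htail : ((PySem.Set.ofList (ps.map Prod.snd)).filter q).flatMap
            (fun k => (((a, b) :: ps).filter (fun p => p.2 == k)).map Prod.fst)
          = ((PySem.Set.ofList (ps.map Prod.snd)).filter q).flatMap
            (fun k => (ps.filter (fun p => p.2 == k)).map Prod.fst) := by
        apply List.flatMap_congr
        intro k hk
        have hqk : q k = true := List.of_mem_filter hk
        have : ¬ ((b : Int) == k) = true := by
          simp only [beq_iff_eq]; rintro rfl; rw [hqk] at hbf; exact absurd hbf (by simp)
        rw [List.filter_cons_of_neg (by simpa using this)]
      rw [htail]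
      exact ih (fun k hk => by
        have hk2 := h k hk; simp only [List.map_cons] at hk2
        exact le_trans (List.count_le_count_cons ..) hk2)

theorem pvFlatMapSingleton (l : List Int) (g : Int → List String)
    (h : ∀ x ∈ l, (g x).length = 1) : l.flatMap g = l.map (fun x => (g x)[0]!) := by
  induction l with
  | nil => rfl
  | cons x l ih =>
    rw [List.flatMap_cons, List.map_cons, ih (fun y hy => h y (List.mem_cons_of_mem _ hy))]
    have h1 := h x List.mem_cons_self
    match hg : g x with
    | [a] => simp
    | [] => rw [hg] at h1; simp at h1
    | a :: b :: t => rw [hg] at h1; simp at h1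

theorem pvLenCount (l : List (String×Int)) (k : Int) :
    (l.filter (fun pr => pr.2 == k)).length = (l.map Prod.snd).count k := by
  rw [List.count, List.countP_map, ← List.countP_eq_length_filter]
  rfl

-- per-dictionary step equality
theorem pvStepEq (acc : List String) (dictionary : List (String × Int)) :
    (let r := pvCountLevels dictionary
     let heirarchy_count := r.1
     let min_level := r.2.1
     let max_level := r.2.2
     let isolated_levels := heirarchy_count.items.foldl
       (fun ls p => if p.2 == 1 && !(p.1 == max_level) && !(p.1 == min_level) then ls ++ [p.1] else ls) []
     if isolated_levels.length > 0 then
       (PySem.Dict.ofList dictionary).items.foldl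
         (fun ns p => if isolated_levels.contains p.2 then ns ++ [p.1] else ns) acc
     else acc)
    =
    (let st := (PySem.Dict.ofList dictionary).items.foldl
       (fun (st : PySem.Dict Int (List String) × Int) p =>
         (st.1.modify p.2 [] (fun ids => ids ++ [p.1]), if p.2 > st.2 then p.2 else st.2))
       (PySem.Dict.empty, 0)
     st.1.items.foldl
       (fun ns g => if g.2.length == 1 && !(g.1 == (0:Int)) && !(g.1 == st.2) then ns ++ [g.2[0]!] else ns)
       acc) := by
  -- notation
  set ps := (PySem.Dict.ofList dictionary).items with hps
  set lv := ps.map Prod.snd with hlv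
  set m := ps.foldl (fun m p => if p.2 > m then p.2 else m) 0 with hm
  set G : Int → List String := fun k => (ps.filter (fun p => p.2 == k)).map Prod.fst with hG
  set q : Int → Bool := fun k => ((lv.count k : Int) == 1) && !(k == m) && !(k == (0:Int)) with hq
  -- A's helper = (counter, 0, m)
  have hA : pvCountLevels dictionary = (PySem.Dict.counter lv, 0, m) := by
    unfold pvCountLevels
    rw [PySem.List.foldl_prod_mk
        (f := fun (hc : PySem.Dict Int Int) (p : String × Int) =>
          if hc.contains p.2 then hc.insert p.2 (hc.getD p.2 0 + 1) else hc.insert p.2 1)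
        (g := fun (mx : Int) (p : String × Int) => if p.2 > mx then p.2 else mx)]
    have h1 : ps.foldl (fun (hc : PySem.Dict Int Int) (p : String × Int) =>
          if hc.contains p.2 then hc.insert p.2 (hc.getD p.2 0 + 1) else hc.insert p.2 1)
        PySem.Dict.empty
        = ps.foldl (fun (hc : PySem.Dict Int Int) (p : String × Int) =>
            hc.insert p.2 (hc.getD p.2 0 + 1)) PySem.Dict.empty := by
      apply PySem.List.foldl_congr_mem
      intro hc p _
      by_cases hcon : hc.contains p.2
      · simp [hcon]
      · rw [if_neg hcon, PySem.Dict.getD_of_not_contains _ _ (by simpa using hcon)]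
        norm_num
    rw [h1, ← List.foldl_map (f := Prod.snd)
        (g := fun (hc : PySem.Dict Int Int) (x : Int) => hc.insert x (hc.getD x 0 + 1)),
        PySem.Dict.foldl_insert_getD_add_one_eq_counter]
  have hq1 : ∀ k, q k = true → lv.count k = 1 := by
    intro k hk
    rw [hq] at hk
    simp only [Bool.and_eq_true, beq_iff_eq] at hk
    exact_mod_cast hk.1.1
  have hlen : ∀ k, (G k).length = lv.count k := by
    intro k
    rw [hG]
    simp only [List.length_map]
    exact pvLenCount ps k
  have hiso : ((PySem.Dict.counter lv).items.foldl
      (fun ls p => if p.2 == 1 && !(p.1 == m) && !(p.1 == (0:Int)) then ls ++ [p.1] else ls) [])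
      = (PySem.Set.ofList lv).filter q := by
    rw [PySem.List.foldl_append_if
        (p := fun pr : Int × Int => pr.2 == 1 && !(pr.1 == m) && !(pr.1 == (0:Int)))
        (f := Prod.fst),
      PySem.Dict.items_counter, List.filter_map, List.map_map]
    simp only [List.nil_append]
    rw [hq]
    simp [Function.comp_def]
  -- B-side dictionary of groups
  have hgd : ∀ k, (ps.foldl (fun (d : PySem.Dict Int (List String)) p =>
        d.modify p.2 [] (fun ids => ids ++ [p.1])) PySem.Dict.empty).getD k [] = G k := by
    intro k
    rw [show (ps.foldl (fun (d : PySem.Dict Int (List String)) p =>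
          d.modify p.2 [] (fun ids => ids ++ [p.1])) PySem.Dict.empty)
        = ((ps.map (fun p => (p.2, p.1))).foldl
            (fun (d : PySem.Dict Int (List String)) r =>
              d.modify r.1 [] (fun x => x ++ [r.2])) PySem.Dict.empty) from by
        rw [List.foldl_map]]
    rw [PySem.Dict.getD_foldl_modify_append, List.filter_map, List.map_map]
    rfl
  have hnd : (ps.foldl (fun (d : PySem.Dict Int (List String)) p =>
        d.modify p.2 [] (fun ids => ids ++ [p.1])) PySem.Dict.empty).keys.Nodup := by
    exact PySem.Dict.nodup_keys_foldl_modify_key ps Prod.snd ([] : List String)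
      (fun _ p => fun ids => ids ++ [p.1]) PySem.Dict.empty (by simp)
  have hitems : (ps.foldl (fun (d : PySem.Dict Int (List String)) p =>
        d.modify p.2 [] (fun ids => ids ++ [p.1])) PySem.Dict.empty).items
      = (PySem.Set.ofList lv).map (fun k => (k, G k)) := by
    rw [PySem.Dict.items_eq_map_keys (ps.foldl (fun (d : PySem.Dict Int (List String)) p =>
        d.modify p.2 [] (fun ids => ids ++ [p.1])) PySem.Dict.empty) hnd ([] : List String),
      PySem.Dict.keys_foldl_modify_key ps Prod.snd ([] : List String)
        (fun _ p => fun ids => ids ++ [p.1]) PySem.Dict.empty]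
    have hke : (PySem.Dict.empty : PySem.Dict Int (List String)).keys = ([] : List Int) := rfl
    rw [hke, PySem.Set.update_nil_left, ← hlv]
    exact List.map_congr_left (fun k _ => by rw [hgd])
  have hcq : ∀ k, ((G k).length == 1 && !(k == (0:Int)) && !(k == m)) = q k := by
    intro k
    rw [hq]
    simp only [hlen k]
    have hce : ((lv.count k) == 1) = (((lv.count k : Int)) == 1) := by
      rcases eq_or_ne (lv.count k) 1 with h | h
      · simp [h]
      · have h2 : (lv.count k : Int) ≠ 1 := by exact_mod_cast h
        simp [h, h2]
    rw [hce]
    cases ((lv.count k : Int) == 1) <;> cases (k == (0:Int)) <;> cases (k == m) <;> rfl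
  -- assemble
  simp only [hA]
  rw [hiso]
  rw [PySem.List.foldl_prod_mk
      (f := fun (d : PySem.Dict Int (List String)) (p : String × Int) =>
        d.modify p.2 [] (fun ids => ids ++ [p.1]))
      (g := fun (mx : Int) (p : String × Int) => if p.2 > mx then p.2 else mx)]
  dsimp only
  rw [← hm]
  rw [PySem.List.foldl_append_if
      (p := fun pr : Int × List String => pr.2.length == 1 && !(pr.1 == (0:Int)) && !(pr.1 == m))
      (f := fun pr : Int × List String => pr.2[0]!), hitems, List.filter_map, List.map_map,
    show ((fun pr : Int × List String => pr.2.length == 1 && !(pr.1 == (0:Int)) && !(pr.1 == m))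
        ∘ (fun k => (k, G k))) = q from funext (fun k => hcq k),
    show ((fun pr : Int × List String => pr.2[0]!) ∘ (fun k : Int => (k, G k)))
        = (fun k : Int => (G k)[0]!) from rfl]
  by_cases h0 : (List.filter q (PySem.Set.ofList lv)).length > 0
  · rw [if_pos h0]
    rw [PySem.List.foldl_append_if
        (p := fun p : String × Int => (List.filter q (PySem.Set.ofList lv)).contains p.2)
        (f := Prod.fst)]
    have hfc : ps.filter (fun p => (List.filter q (PySem.Set.ofList lv)).contains p.2)
        = ps.filter (fun p => q p.2) := by
      apply List.filter_congr
      intro p hp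
      have hpm : p.2 ∈ PySem.Set.ofList lv :=
        (PySem.Set.mem_ofList _ _).2 (hlv ▸ List.mem_map_of_mem hp)
      cases hqp : q p.2 with
      | true => simp [List.mem_filter, hpm, hqp]
      | false => simp [List.mem_filter, hqp]
    rw [hfc]
    congr 1
    rw [pvGroupSplit ps q (fun k hk => by
      rw [← hlv, hq1 k hk])]
    rw [← hlv, ← hG]
    exact pvFlatMapSingleton _ G (fun x hx => by
      rw [hlen]; exact hq1 x (List.of_mem_filter hx))
  · rw [if_neg h0]
    have hnil : List.filter q (PySem.Set.ofList lv) = [] := by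
      cases hfe : List.filter q (PySem.Set.ofList lv) with
      | nil => rfl
      | cons a t => rw [hfe] at h0; simp at h0
    rw [hnil]
    simp

-- ===== VERDICT (by name: the statement is the Claim_ definition above) =====
theorem analyze_hierarchy_dicts_spec : Claim_equal_analyze_hierarchy_dicts := by
  intro node_list heirarchy_list _
  unfold Spec_analyze_hierarchy_dicts analyze_hierarchy_dicts analyze_hierarchy_dicts_alt
  apply PySem.List.foldl_congr_mem
  intro acc dict _
  exact pvStepEq acc dict
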